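-- pv_equiv track=rewrite | github.com/PragathiNS/PythonCodes | google_challenge/cake.py | answer
-- ===== SOURCE A (Python) =====
-- def answer(s):
--     last_char = s[-1]
--     patt = ""
--     for i in s:
--         if i == last_char:
--             patt += i
--             com_str = patt * s.count(patt)
--             if (com_str == s):
--                 return (s.count(patt))
--             else:
--                 continue
--         patt += i
--     print (patt)
--     return (0)
-- ===== SOURCE B (Python) =====
-- def answer(s):
--     n = len(s)
--     for d in range(1, n + 1):
--         if n % d == 0 and s[:d] * (n // d) == s:
--             return n // d
--     return 0  # only reachable for empty s (outside the stated domain)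
-- ===== Notes on version B (the rewrite author's own statement) =====
-- stated objective: faster
-- what changed: A scans every prefix ending in s[-1] and runs an O(n) s.count plus an O(n) comparison for each; B only tries the divisors d of len(s) in increasing order and returns n//d for the first d with s[:d]*(n//d)==s.
import Mathlib
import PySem

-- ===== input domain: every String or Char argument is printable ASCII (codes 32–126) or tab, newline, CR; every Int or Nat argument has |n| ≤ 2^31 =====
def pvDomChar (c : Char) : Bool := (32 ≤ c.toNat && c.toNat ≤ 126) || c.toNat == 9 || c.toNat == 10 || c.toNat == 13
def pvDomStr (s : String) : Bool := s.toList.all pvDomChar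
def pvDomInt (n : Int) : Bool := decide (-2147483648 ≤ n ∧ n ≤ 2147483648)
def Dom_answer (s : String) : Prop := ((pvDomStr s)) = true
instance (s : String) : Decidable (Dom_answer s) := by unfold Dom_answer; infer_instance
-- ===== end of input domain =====

-- B replaces A's scan over all prefixes ending in s[-1] (each with an O(n) count and compare)
-- by a scan over the divisors d of len(s) only, testing s[:d]*(n//d)==s; objective: faster.
-- A's `print(patt)` line is unreachable for non-empty s (its return value is what is ported).

-- ===== PORT A =====
-- Python's  p * m  on a string, for an Int m (m ≤ 0 gives ""); exact.
def pyMulChars (p : List Char) (m : Int) : List Char := (List.replicate m.toNat p).flatten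

-- the `for i in s` loop of A, carrying the accumulated `patt`
def answerGo (cs : List Char) (last : Char) : List Char → List Char → Int
  | [], _ => 0        -- falls off the loop: print(patt); return 0
  | i :: rest, patt =>
    if i == last then
      let patt' := patt ++ [i]
      if pyMulChars patt' ((PySem.Chars.count cs patt' : Nat) : Int) == cs then
        ((PySem.Chars.count cs patt' : Nat) : Int)
      else answerGo cs last rest patt'
    else answerGo cs last rest (patt ++ [i])

def answer (s : String) : Int :=
  match PySem.Str.pyGet? s (-1) with
  | none => 0              -- s[-1] raises IndexError on "" ; excluded by Pre_answer
  | some last => answerGo s.toList last s.toList []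

-- ===== PORT B =====
-- the `for d in range(1, n+1)` loop of B
def answerAltGo (cs : List Char) (n : Int) : List Int → Int
  | [] => 0                -- only reachable for empty s (outside the stated domain)
  | d :: ds =>
    if PySem.Int.mod n d == 0
        && pyMulChars (PySem.Chars.slice cs none (some d)) (PySem.Int.floordiv n d) == cs then
      PySem.Int.floordiv n d
    else answerAltGo cs n ds

def answer_alt (s : String) : Int :=
  answerAltGo s.toList (PySem.Str.len s) (PySem.List.pyRange 1 (PySem.Str.len s + 1) 1)

-- ===== PRECONDITION & SPEC =====
-- Pre_ excludes only the empty string, on which A's `s[-1]` raises IndexError.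
def Pre_answer (s : String) : Prop := s ≠ ""
instance (s : String) : Decidable (Pre_answer s) := by unfold Pre_answer; infer_instance
def pvWitness_answer : String := "abab"

def Spec_answer (s : String) (out : Int) : Prop := out = answer_alt s
instance (s : String) (out : Int) : Decidable (Spec_answer s out) := by unfold Spec_answer; infer_instance

-- ===== CLAIM (what is proved, stated in full; the proofs are below) =====
def Claim_equal_answer : Prop := ∀ (s : String), Dom_answer s → Pre_answer s → Spec_answer s (answer s)

-- ===== LEMMAS AND PROOFS =====

-- d is a period length of cs dividing its length: cs is d-prefix repeated length/d times
def Per (cs : List Char) (d : Nat) : Prop :=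
  1 ≤ d ∧ d ∣ cs.length ∧ (List.replicate (cs.length / d) (cs.take d)).flatten = cs

lemma per_le {cs : List Char} {d : Nat} (hne : cs ≠ []) (h : Per cs d) : d ≤ cs.length :=
  Nat.le_of_dvd (List.length_pos_iff.mpr hne) h.2.1

lemma flatten_replicate_length (m : Nat) (p : List Char) :
    ((List.replicate m p).flatten).length = m * p.length := by simp

lemma flatten_replicate_getLast? (p : List Char) :
    ∀ k, 1 ≤ k → ((List.replicate k p).flatten).getLast? = p.getLast? := by
  intro k
  induction k with
  | zero => intro h; omega
  | succ k ih =>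
    intro _
    rcases Nat.eq_zero_or_pos k with hk | hk
    · subst hk; simp
    · rw [List.replicate_succ, List.flatten_cons, List.getLast?_append, ih hk]
      cases hp : p.getLast? with
      | none => simp
      | some c => simp

lemma count_go_step (p t : List Char) (f acc : Nat) (c : Char) :
    PySem.Chars.count.go p (f + 1) (c :: t) acc
      = if p.isPrefixOf (c :: t) then PySem.Chars.count.go p f (List.drop p.length (c :: t)) (acc + 1)
        else PySem.Chars.count.go p f t acc := rfl

lemma count_go_repeat (p : List Char) (hp : p ≠ []) :
    ∀ (k fuel acc : Nat), k * p.length ≤ fuel →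
      PySem.Chars.count.go p fuel ((List.replicate k p).flatten) acc = acc + k := by
  intro k
  induction k with
  | zero => intro fuel acc _; cases fuel <;> simp [PySem.Chars.count.go]
  | succ k ih =>
    intro fuel acc hfuel
    have hplen : 1 ≤ p.length := List.length_pos_iff.mpr hp
    have : 1 ≤ fuel := by nlinarith
    rw [List.replicate_succ, List.flatten_cons]
    obtain ⟨c, t, hct⟩ : ∃ c t, p = c :: t := by
      cases p with | nil => exact absurd rfl hp | cons c t => exact ⟨c, t, rfl⟩
    have hpre : p.isPrefixOf (p ++ (List.replicate k p).flatten) = true := by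
      rw [List.isPrefixOf_iff_prefix]; exact List.prefix_append _ _
    obtain ⟨f, rfl⟩ : ∃ f', fuel = f' + 1 := ⟨fuel - 1, by omega⟩
    rw [show p ++ (List.replicate k p).flatten = c :: (t ++ (List.replicate k p).flatten) by
          rw [hct]; rfl,
        count_go_step,
        show c :: (t ++ (List.replicate k p).flatten) = p ++ (List.replicate k p).flatten by
          rw [hct]; rfl,
        if_pos hpre, List.drop_left]
    rw [ih f (acc + 1) (by nlinarith)]
    omega

lemma count_repeat (p : List Char) (hp : p ≠ []) (k : Nat) :
    PySem.Chars.count ((List.replicate k p).flatten) p = k := by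
  have hne : p.isEmpty = false := by simp [hp]
  rw [PySem.Chars.count, hne]
  simp only [Bool.false_eq_true, if_false]
  rw [count_go_repeat p hp k _ 0 (by rw [flatten_replicate_length])]
  omega

lemma take_ne_nil {cs : List Char} {ℓ : Nat} (h1 : 1 ≤ ℓ) (hne : cs ≠ []) : cs.take ℓ ≠ [] := by
  simp [List.take_eq_nil_iff, hne]; omega

-- A's inner test, at the prefix of length ℓ, succeeds exactly on period lengths
lemma check_iff (cs : List Char) (ℓ : Nat) (h1 : 1 ≤ ℓ) (hℓ : ℓ ≤ cs.length) :
    pyMulChars (cs.take ℓ) ((PySem.Chars.count cs (cs.take ℓ) : Nat) : Int) = cs ↔ Per cs ℓ := by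
  have hlen : (cs.take ℓ).length = ℓ := by simp [List.length_take]; omega
  have hpne : cs.take ℓ ≠ [] := take_ne_nil h1 (by intro h; subst h; simp at hℓ; omega)
  constructor
  · intro h
    set m := PySem.Chars.count cs (cs.take ℓ) with hm
    have hflat : (List.replicate m (cs.take ℓ)).flatten = cs := by
      simpa [pyMulChars] using h
    have hlen2 : m * ℓ = cs.length := by
      have := congrArg List.length hflat
      rwa [flatten_replicate_length, hlen] at this
    refine ⟨h1, ⟨m, by rw [← hlen2, Nat.mul_comm]⟩, ?_⟩
    have : cs.length / ℓ = m := by rw [← hlen2, Nat.mul_div_cancel m (by omega)]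
    rw [this, hflat]
  · rintro ⟨-, hdvd, hflat⟩
    have hcount := count_repeat (cs.take ℓ) hpne (cs.length / ℓ)
    rw [hflat] at hcount
    rw [hcount]
    simpa [pyMulChars] using hflat

-- a period prefix ends with the last character of cs
lemma per_getLast? {cs : List Char} {ℓ : Nat} (hne : cs ≠ []) (h : Per cs ℓ) :
    (cs.take ℓ).getLast? = cs.getLast? := by
  obtain ⟨h1, hdvd, hflat⟩ := h
  have hn : 1 ≤ cs.length := List.length_pos_iff.mpr hne
  have hk : 1 ≤ cs.length / ℓ := Nat.one_le_div_iff (by omega) |>.mpr (Nat.le_of_dvd (by omega) hdvd)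
  conv_rhs => rw [← hflat]
  rw [flatten_replicate_getLast? _ _ hk]

-- A's loop computes length / (least period), given the invariant that no prefix checked so far is a period
lemma answerGo_eq (cs : List Char) (hne : cs ≠ []) (d₀ : Nat)
    (hP : Per cs d₀) (hmin : ∀ d', d' < d₀ → ¬ Per cs d') :
    ∀ rest patt, patt ++ rest = cs → (∀ ℓ, 1 ≤ ℓ → ℓ ≤ patt.length → ¬ Per cs ℓ) →
      answerGo cs (cs.getLast hne) rest patt = ((cs.length / d₀ : Nat) : Int) := by
  intro rest
  induction rest with
  | nil =>
    intro patt hsplit hinv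
    exfalso
    have : patt = cs := by simpa using hsplit
    subst this
    exact hinv d₀ hP.1 (per_le hne hP) hP
  | cons i rest ih =>
    intro patt hsplit hinv
    have hsplit' : (patt ++ [i]) ++ rest = cs := by simpa using hsplit
    have htake : cs.take (patt.length + 1) = patt ++ [i] := by
      rw [← hsplit']
      have : (patt ++ [i]).length = patt.length + 1 := by simp
      rw [← this, List.take_left]
    have hℓn : patt.length + 1 ≤ cs.length := by
      rw [← hsplit']; simp
    rw [answerGo]
    by_cases hlast : i == cs.getLast hne
    · rw [if_pos hlast]
      simp only []
      by_cases hper : Per cs (patt.length + 1)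
      · have hchk : pyMulChars (patt ++ [i])
            ((PySem.Chars.count cs (patt ++ [i]) : Nat) : Int) = cs := by
          rw [← htake]; exact (check_iff cs _ (by omega) hℓn).mpr hper
        rw [if_pos (by exact beq_iff_eq.mpr hchk)]
        have hd : d₀ = patt.length + 1 := by
          rcases Nat.lt_trichotomy d₀ (patt.length + 1) with h | h | h
          · exact absurd hP (hinv d₀ hP.1 (by omega))
          · exact h
          · exact absurd hper (hmin _ h)
        have hcount : PySem.Chars.count cs (patt ++ [i]) = cs.length / (patt.length + 1) := by
          rw [← htake]
          have h := count_repeat (cs.take (patt.length + 1)) (take_ne_nil (by omega) hne)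
            (cs.length / (patt.length + 1))
          rwa [hper.2.2] at h
        rw [hcount, hd]
      · have hchk : ¬ (pyMulChars (patt ++ [i])
            ((PySem.Chars.count cs (patt ++ [i]) : Nat) : Int) = cs) := by
          rw [← htake]; exact fun h => hper ((check_iff cs _ (by omega) hℓn).mp h)
        rw [if_neg (by simpa using hchk)]
        refine ih (patt ++ [i]) hsplit' ?_
        intro ℓ h1 h2
        rcases Nat.lt_or_ge ℓ (patt.length + 1) with h | h
        · exact hinv ℓ h1 (by omega)
        · have : ℓ = patt.length + 1 := by simp at h2; omega
          subst this; exact hper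
    · rw [if_neg hlast]
      refine ih (patt ++ [i]) hsplit' ?_
      intro ℓ h1 h2
      rcases Nat.lt_or_ge ℓ (patt.length + 1) with h | h
      · exact hinv ℓ h1 (by omega)
      · have hℓ : ℓ = patt.length + 1 := by simp at h2; omega
        subst hℓ
        intro hper
        apply hlast
        have h1' := per_getLast? hne hper
        rw [htake, List.getLast?_eq_some_getLast hne] at h1'
        simp only [List.getLast?_append, List.getLast?_singleton, Option.some_or] at h1'
        exact beq_iff_eq.mpr (by injection h1')

-- B's loop computes the same value
lemma answerAltGo_eq (cs : List Char) (hne : cs ≠ []) (d₀ : Nat)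
    (hP : Per cs d₀) (hmin : ∀ d', d' < d₀ → ¬ Per cs d') :
    ∀ (k d : Nat), 1 ≤ d → d + k = cs.length + 1 → (∀ d', d' < d → ¬ Per cs d') →
      answerAltGo cs (cs.length : Int)
          (List.map (fun j : Nat => ((d + j : Nat) : Int)) (List.range k))
        = ((cs.length / d₀ : Nat) : Int) := by
  intro k
  induction k with
  | zero =>
    intro d hd hdk hinv
    exfalso
    exact hinv d₀ (by have := per_le hne hP; omega) hP
  | succ k ih =>
    intro d hd hdk hinv
    rw [List.range_succ_eq_map, List.map_cons, List.map_map]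
    have hhead : ((d + 0 : Nat) : Int) = (d : Int) := by simp
    rw [hhead, answerAltGo]
    have hmod : PySem.Int.mod (cs.length : Int) (d : Int) = ((cs.length % d : Nat) : Int) :=
      PySem.Int.mod_natCast cs.length d
    have hdiv : PySem.Int.floordiv (cs.length : Int) (d : Int) = ((cs.length / d : Nat) : Int) :=
      PySem.Int.floordiv_natCast cs.length d
    have hslice : PySem.Chars.slice cs none (some (d : Int)) = cs.take d := by
      rw [PySem.Chars.slice_eq_listSlice]
      exact PySem.List.slice_to_natCast cs d
    have hcond : (PySem.Int.mod (cs.length : Int) (d : Int) == 0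
        && pyMulChars (PySem.Chars.slice cs none (some (d : Int)))
             (PySem.Int.floordiv (cs.length : Int) (d : Int)) == cs) = true
        ↔ Per cs d := by
      rw [hmod, hdiv, hslice]
      constructor
      · intro h
        simp only [Bool.and_eq_true, beq_iff_eq] at h
        obtain ⟨h1, h2⟩ := h
        have hdvd : d ∣ cs.length := Nat.dvd_of_mod_eq_zero (by exact_mod_cast h1)
        refine ⟨hd, hdvd, ?_⟩
        simpa [pyMulChars] using h2
      · rintro ⟨-, hdvd, hflat⟩
        simp only [Bool.and_eq_true, beq_iff_eq]
        have hm0 : cs.length % d = 0 := Nat.dvd_iff_mod_eq_zero.mp hdvd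
        exact ⟨by exact_mod_cast congrArg (Nat.cast (R := Int)) hm0, by simpa [pyMulChars] using hflat⟩
    by_cases hper : Per cs d
    · rw [if_pos (hcond.mpr hper)]
      have hdd : d₀ = d := by
        rcases Nat.lt_trichotomy d₀ d with h | h | h
        · exact absurd hP (hinv d₀ h)
        · omega
        · exact absurd hper (hmin _ h)
      rw [hdiv, hdd]
    · rw [if_neg (fun h => hper (hcond.mp h))]
      have hmap : List.map ((fun j : Nat => ((d + j : Nat) : Int)) ∘ Nat.succ) (List.range k)
          = List.map (fun j : Nat => (((d + 1) + j : Nat) : Int)) (List.range k) := by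
        apply List.map_congr_left
        intro j _
        simp [Nat.succ_eq_add_one]
        ring_nf
      rw [hmap]
      refine ih (d + 1) (by omega) (by omega) ?_
      intro d' hd'
      rcases Nat.lt_or_ge d' d with h | h
      · exact hinv d' h
      · have : d' = d := by omega
        subst this; exact hper

lemma toList_ne_nil {s : String} (h : s ≠ "") : s.toList ≠ [] := by
  intro hh; apply h; exact String.ext (by simp_all [String.toList])

lemma per_length (cs : List Char) (hne : cs ≠ []) : Per cs cs.length := by
  have h1 : 1 ≤ cs.length := List.length_pos_iff.mpr hne
  refine ⟨h1, dvd_refl _, ?_⟩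
  rw [Nat.div_self (by omega)]
  simp

-- ===== VERDICT (by name: the statement is the Claim_ definition above) =====
theorem answer_spec : Claim_equal_answer := by
  intro s _ hpre
  unfold Spec_answer
  have hne : s.toList ≠ [] := toList_ne_nil hpre
  set cs := s.toList with hcs
  -- a least period length exists
  have hex : ∃ d, Per cs d := ⟨cs.length, per_length cs hne⟩
  obtain ⟨d₀, hP, hmin⟩ : ∃ d₀, Per cs d₀ ∧ ∀ d', d' < d₀ → ¬ Per cs d' := by
    haveI := Classical.decPred (Per cs)
    exact ⟨Nat.find hex, Nat.find_spec hex, fun d' h => Nat.find_min hex h⟩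
  -- A's side
  have hA : answer s = ((cs.length / d₀ : Nat) : Int) := by
    rw [answer]
    have hget : PySem.Str.pyGet? s (-1) = some (cs.getLast hne) := by
      rw [PySem.Str.pyGet?, ← hcs, PySem.Chars.pyGet?_eq_listPyGet?, PySem.List.pyGet?_neg_one,
        List.getLast?_eq_some_getLast hne]
    rw [hget]
    exact answerGo_eq cs hne d₀ hP hmin cs [] (by simp) (by intro ℓ h1 h2; simp at h2; omega)
  -- B's side
  have hB : answer_alt s = ((cs.length / d₀ : Nat) : Int) := by
    rw [answer_alt, PySem.Str.len, ← hcs]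
    rw [PySem.List.pyRange_one]
    have h1 : ((cs.length : Int) + 1 - 1).toNat = cs.length := by omega
    rw [h1]
    have hmap : List.map (fun k : Nat => (1 : Int) + (k : Int)) (List.range cs.length)
        = List.map (fun j : Nat => ((1 + j : Nat) : Int)) (List.range cs.length) := by
      apply List.map_congr_left
      intro j _
      push_cast
      ring
    rw [hmap]
    exact answerAltGo_eq cs hne d₀ hP hmin cs.length 1 (by omega) (by omega)
      (fun d' hd' hper => by have := hper.1; omega)
  rw [hA, hB]
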